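-- pv_equiv track=rewrite | github.com/Bogdan-Cristian-Burci/InvoiceParser | python-parser/src/extractors/table_extractor.py | _clean_unit_of_measure
-- ===== SOURCE A (Python) =====
-- from typing import List, Optional, Dict, Any
--
-- def _clean_unit_of_measure(unit_str: str) -> Optional[str]:
--     """Clean and standardize unit of measure string."""
--
--     if not unit_str:
--         return None
--
--     # Handle multi-line unit strings (common issue from current extraction)
--     lines = str(unit_str).split('\n')
--
--     # Look for standard units
--     standard_units = ['MT', 'KG', 'PZ', 'NR', 'KM']
--
--     for line in lines:
--         line = line.strip().upper()
--         if line in standard_units: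
--             return line
--
--     # If no standard unit found, return first non-empty line
--     for line in lines:
--         line = line.strip()
--         if line and line.upper() != 'NAN':
--             return line[:10]  # Truncate to reasonable length
--
--     return None
-- ===== SOURCE B (Python) =====
-- def _clean_unit_of_measure(unit_str):
--     """Clean and standardize unit of measure string (single pass with fallback)."""
--     if not unit_str:
--         return None
--     fallback = None
--     for line in str(unit_str).split('\n'):
--         s = line.strip()
--         u = s.upper()
--         if u in ('MT', 'KG', 'PZ', 'NR', 'KM'):
--             return u
--         if fallback is None and s and u != 'NAN':
--             fallback = s[:10]
--     return fallback
-- ===== Notes on version B (the rewrite author's own statement) =====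
-- stated objective: simpler
-- what changed: The two sequential scans over the lines (first for a standard unit, then for the first non-empty non-NAN fallback) are merged into a single pass that returns a standard unit immediately and carries the first fallback candidate in an accumulator.
import Mathlib
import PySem

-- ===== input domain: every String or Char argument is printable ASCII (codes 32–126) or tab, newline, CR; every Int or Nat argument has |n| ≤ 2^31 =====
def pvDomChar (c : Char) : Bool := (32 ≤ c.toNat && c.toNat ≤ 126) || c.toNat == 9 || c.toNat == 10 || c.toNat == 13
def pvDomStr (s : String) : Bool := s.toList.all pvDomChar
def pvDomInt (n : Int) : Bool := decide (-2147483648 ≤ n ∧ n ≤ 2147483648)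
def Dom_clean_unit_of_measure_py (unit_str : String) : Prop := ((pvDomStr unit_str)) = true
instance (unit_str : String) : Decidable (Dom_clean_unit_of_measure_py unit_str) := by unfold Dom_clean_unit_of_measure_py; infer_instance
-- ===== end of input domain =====

-- B merges A's two sequential scans into one pass with a fallback accumulator (objective: simpler).

-- ===== PORT A =====
def pvStdUnits : List String := ["MT", "KG", "PZ", "NR", "KM"]

-- first loop of A: first line whose strip().upper() is a standard unit
def pvALoop1 : List String → Option String
  | [] => none
  | l :: ls =>
    let line := PySem.Str.upper (PySem.Str.strip l)
    if line ∈ pvStdUnits then some line else pvALoop1 ls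

-- second loop of A: first non-empty stripped line whose upper() ≠ "NAN", truncated to 10
def pvALoop2 : List String → Option String
  | [] => none
  | l :: ls =>
    let line := PySem.Str.strip l
    if line ≠ "" ∧ PySem.Str.upper line ≠ "NAN" then
      some (PySem.Str.slice line none (some 10))
    else pvALoop2 ls

def clean_unit_of_measure_py (unit_str : String) : Option String :=
  if unit_str = "" then none
  else
    let lines := (PySem.Str.split? unit_str "\n").getD []   -- sep "\n" ≠ "": never raises
    match pvALoop1 lines with
    | some u => some u
    | none => pvALoop2 lines

-- ===== PORT B =====
-- single pass: return a standard unit immediately, carry the first fallback candidate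
def pvBLoop : List String → Option String → Option String
  | [], fb => fb
  | l :: ls, fb =>
    let s := PySem.Str.strip l
    let u := PySem.Str.upper s
    if u ∈ pvStdUnits then some u
    else pvBLoop ls (if fb = none ∧ s ≠ "" ∧ u ≠ "NAN" then some (PySem.Str.slice s none (some 10)) else fb)

def clean_unit_of_measure_py_alt (unit_str : String) : Option String :=
  if unit_str = "" then none
  else pvBLoop ((PySem.Str.split? unit_str "\n").getD []) none

-- ===== PRECONDITION & SPEC =====
def Spec_clean_unit_of_measure_py (unit_str : String) (out : Option String) : Prop := out = clean_unit_of_measure_py_alt unit_str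
instance (unit_str : String) (out : Option String) : Decidable (Spec_clean_unit_of_measure_py unit_str out) := by unfold Spec_clean_unit_of_measure_py; infer_instance

-- ===== CLAIM (what is proved, stated in full; the proofs are below) =====
def Claim_equal_clean_unit_of_measure_py : Prop := ∀ (unit_str : String), Dom_clean_unit_of_measure_py unit_str → Spec_clean_unit_of_measure_py unit_str (clean_unit_of_measure_py unit_str)

-- ===== LEMMAS AND PROOFS =====

-- B's single pass equals: first loop's answer, else the carried fallback, else second loop's answer
theorem pvBLoop_eq (ls : List String) (fb : Option String) :
    pvBLoop ls fb = ((pvALoop1 ls).orElse (fun _ => fb.orElse (fun _ => pvALoop2 ls))) := by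
  induction ls generalizing fb with
  | nil => cases fb <;> simp [pvBLoop, pvALoop1, pvALoop2]
  | cons l ls ih =>
    simp only [pvBLoop, pvALoop1, pvALoop2]
    by_cases h1 : PySem.Str.upper (PySem.Str.strip l) ∈ pvStdUnits
    · simp [h1]
    · simp only [h1, if_false]
      rw [ih]
      cases fb with
      | some f => simp
      | none =>
        by_cases h2 : PySem.Str.strip l ≠ "" ∧ PySem.Str.upper (PySem.Str.strip l) ≠ "NAN"
        · simp [h2]
        · simp [h2]

-- ===== VERDICT (by name: the statement is the Claim_ definition above) =====
theorem clean_unit_of_measure_py_spec : Claim_equal_clean_unit_of_measure_py := by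
  intro unit_str _
  unfold Spec_clean_unit_of_measure_py clean_unit_of_measure_py clean_unit_of_measure_py_alt
  by_cases h : unit_str = ""
  · simp [h]
  · simp only [h, if_false]
    rw [pvBLoop_eq]
    cases pvALoop1 ((PySem.Str.split? unit_str "\n").getD []) <;> simp
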